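-- pv_equiv track=rewrite | github.com/heestogram/codetest | programmers/python/영어끝말잇기.py | solution
-- ===== SOURCE A (Python) =====
-- from collections import defaultdict
--
-- def solution(n, words):
--     answer = []
--     count = defaultdict(int)
--
--     t=0
--     for w in words:
--         count[w]+=1
--         if t>=1:
--             if count[w]>1 or words[t][0]!=words[t-1][-1]:
--                 break
--         t+=1
--     if t==len(words):
--         answer=[0,0]
--     else:
--         answer.append(t%n+1)
--         answer.append(t//n+1)
--     return answer
-- ===== SOURCE B (Python) =====
-- def solution(n, words):
--     dup = None
--     seen = set()
--     for j, w in enumerate(words):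
--         if w in seen:
--             dup = j
--             break
--         seen.add(w)
--     limit = dup if dup is not None else len(words)
--     mism = None
--     for i in range(1, limit):
--         if words[i][0] != words[i - 1][-1]:
--             mism = i
--             break
--     cands = [x for x in (dup, mism) if x is not None]
--     t = min(cands) if cands else len(words)
--     if t == len(words):
--         return [0, 0]
--     return [t % n + 1, t // n + 1]
-- ===== Notes on version B (the rewrite author's own statement) =====
-- stated objective: alternative
-- what changed: Replaces A's single counting loop (defaultdict counter + combined break test) by two independent passes -- a set-based first-duplicate scan, then a first chain-mismatch scan over consecutive pairs bounded by the duplicate index -- whose results are combined with min to get the break index.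
import Mathlib
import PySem

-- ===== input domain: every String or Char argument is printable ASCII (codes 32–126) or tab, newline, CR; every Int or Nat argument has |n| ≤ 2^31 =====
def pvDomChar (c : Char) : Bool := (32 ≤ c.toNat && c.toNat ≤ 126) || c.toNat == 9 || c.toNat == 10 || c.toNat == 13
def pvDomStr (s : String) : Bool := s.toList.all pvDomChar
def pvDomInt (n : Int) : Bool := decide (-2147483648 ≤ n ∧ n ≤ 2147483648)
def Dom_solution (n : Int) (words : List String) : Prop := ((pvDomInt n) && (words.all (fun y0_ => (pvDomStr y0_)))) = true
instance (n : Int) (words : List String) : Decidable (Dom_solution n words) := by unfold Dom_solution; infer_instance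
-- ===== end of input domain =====

-- B re-implements the break search as two independent passes (first-duplicate index and first chain-mismatch
-- index) combined by min, instead of A's single counting loop; same cost, different decomposition.

-- shared totalized character accessors: w[0] and w[-1]; exact for nonempty strings (Pre_ guarantees that)
def pvChar0 (s : String) : Char := (PySem.Str.pyGet? s 0).getD ' '
def pvCharL (s : String) : Char := (PySem.Str.pyGet? s (-1)).getD ' '

-- ===== PORT A =====
-- the for-loop with break: state = (count, t); words[t] / words[t-1] via pyGet? (in range under Pre_)
def pvLoopA (words : List String) (count : PySem.Dict String Int) (t : Int) : List String → Int
  | [] => t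
  | w :: rest =>
    let c := count.insert w (count.getD w 0 + 1)
    if 1 ≤ t ∧ (1 < c.getD w 0 ∨
        pvChar0 ((PySem.List.pyGet? words t).getD "") ≠ pvCharL ((PySem.List.pyGet? words (t - 1)).getD ""))
    then t
    else pvLoopA words c (t + 1) rest

def solution (n : Int) (words : List String) : List Int :=
  let t := pvLoopA words PySem.Dict.empty 0 words
  if t = (words.length : Int) then [0, 0]
  else [PySem.Int.mod t n + 1, PySem.Int.floordiv t n + 1]

-- ===== PORT B =====
-- pass 1: first index whose word was already seen (set membership)
def pvFindDup (seen : PySem.Set String) (j : Int) : List String → Option Int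
  | [] => none
  | w :: rest => if PySem.Set.contains seen w then some j else pvFindDup (seen.add w) (j + 1) rest

-- pass 2: first i in range(1, len(words)) with words[i][0] != words[i-1][-1]
def pvFindMism (words : List String) : List Int → Option Int
  | [] => none
  | i :: rest =>
    if pvChar0 ((PySem.List.pyGet? words i).getD "") ≠ pvCharL ((PySem.List.pyGet? words (i - 1)).getD "")
    then some i
    else pvFindMism words rest

def solution_alt (n : Int) (words : List String) : List Int :=
  let dup := pvFindDup PySem.Set.empty 0 words
  let limit : Int := dup.getD (words.length : Int)
  let mism := pvFindMism words (PySem.List.pyRange 1 limit 1)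
  let cands := [dup, mism].filterMap id
  let t := match PySem.List.min? cands (fun x => x) with
    | some m => m
    | none => (words.length : Int)
  if t = (words.length : Int) then [0, 0]
  else [PySem.Int.mod t n + 1, PySem.Int.floordiv t n + 1]

-- ===== PRECONDITION & SPEC =====
-- Bool forms of A's break tests, over a Nat position in the full list
def pvDupB (words : List String) (k : Nat) : Bool :=
  (words.take k).contains ((PySem.List.pyGet? words (k : Int)).getD "")
def pvMismB (words : List String) (k : Nat) : Bool :=
  decide (1 ≤ k) &&
  decide (pvChar0 ((PySem.List.pyGet? words (k : Int)).getD "") ≠ pvCharL ((PySem.List.pyGet? words ((k : Int) - 1)).getD ""))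
def pvP (words : List String) (k : Nat) : Bool := pvDupB words k || pvMismB words k

-- Pre_ holds exactly on the inputs where Python A returns normally: if no position breaks the chain,
-- every word must be nonempty as soon as two words exist (else A's indexing raises IndexError); if t is the
-- first breaking position, A needs n ≠ 0 (else t % n raises ZeroDivisionError) and every word the scan's
-- character tests actually touch (indices 0..t, resp. 0..t-1 when the duplicate test short-circuits) nonempty.
-- pvPreB decides that condition: t is the FIRST break position (first satisfying pvP), t' the last index
-- the character tests touch.
def pvPreB (n : Int) (words : List String) : Bool :=
  match (List.range words.length).find? (pvP words) with
  | none => decide (words.length < 2) || words.all (fun w => w ≠ "")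
  | some t =>
    let t' := if pvDupB words t then t - 1 else t
    decide (n ≠ 0) && (decide (t' < 1) || (List.range (t' + 1)).all (fun j => words.getD j "" ≠ ""))

def Pre_solution (n : Int) (words : List String) : Prop := pvPreB n words = true
instance (n : Int) (words : List String) : Decidable (Pre_solution n words) := by unfold Pre_solution; infer_instance
def pvWitness_solution : Int × List String := (3, ["tank", "kick", "know", "wheel"])

def Spec_solution (n : Int) (words : List String) (out : List Int) : Prop := out = solution_alt n words
instance (n : Int) (words : List String) (out : List Int) : Decidable (Spec_solution n words out) := by unfold Spec_solution; infer_instance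

-- ===== CLAIM (what is proved, stated in full; the proofs are below) =====
def Claim_equal_solution : Prop := ∀ (n : Int) (words : List String), Dom_solution n words → Pre_solution n words → Spec_solution n words (solution n words)

-- ===== LEMMAS AND PROOFS =====


def pvCombine : Option Int → Option Int → Option Int
  | none, b => b
  | a, none => a
  | some a, some b => some (min a b)

theorem pvLoopA_char (words : List String) : ∀ (rest pre : List String), words = pre ++ rest →
    pvLoopA words (pre.foldl (fun d x => d.insert x (d.getD x 0 + 1)) PySem.Dict.empty) (pre.length : Int) rest
    = match (List.range' pre.length rest.length).find? (pvP words) with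
      | some k => (k : Int)
      | none => (words.length : Int) := by
  intro rest
  induction rest with
  | nil =>
    intro pre h
    simp [pvLoopA, h]
  | cons w t ih =>
    intro pre h
    have hget : (PySem.List.pyGet? words (pre.length : Int)).getD "" = w := by
      rw [h, PySem.List.pyGet?_append_length]; rfl
    have htake : words.take pre.length = pre := by rw [h]; exact List.take_left
    have hcnt : ((pre.foldl (fun d x => d.insert x (d.getD x 0 + 1)) PySem.Dict.empty).insert w
        ((pre.foldl (fun d x => d.insert x (d.getD x 0 + 1)) PySem.Dict.empty).getD w 0 + 1)).getD w 0
        = (pre.count w : Int) + 1 := by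
      have h1 := PySem.Dict.getD_foldl_insert_add_one (pre ++ [w]) PySem.Dict.empty w
      rw [List.foldl_append] at h1
      simpa using h1
    have hdup : pvDupB words pre.length = pre.contains w := by
      unfold pvDupB; rw [hget, htake]
    have hcond : (1 ≤ (pre.length : Int) ∧ ((1 : Int) < ((pre.foldl (fun d x => d.insert x (d.getD x 0 + 1)) PySem.Dict.empty).insert w
        ((pre.foldl (fun d x => d.insert x (d.getD x 0 + 1)) PySem.Dict.empty).getD w 0 + 1)).getD w 0 ∨
        pvChar0 ((PySem.List.pyGet? words (pre.length : Int)).getD "") ≠ pvCharL ((PySem.List.pyGet? words ((pre.length : Int) - 1)).getD "")))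
        ↔ pvP words pre.length = true := by
      rw [hcnt]
      unfold pvP pvMismB
      rw [hdup]
      constructor
      · rintro ⟨h1, h2 | h2⟩
        · have hc0 : (0 : Int) < (pre.count w : Int) := by omega
          have : w ∈ pre := List.count_pos_iff.mp (by exact_mod_cast hc0)
          simp [List.contains_eq_mem, this]
        · have h1' : 1 ≤ pre.length := by exact_mod_cast h1
          refine Bool.or_eq_true _ _ |>.mpr (Or.inr ?_)
          rw [Bool.and_eq_true, decide_eq_true_eq, decide_eq_true_eq]
          exact ⟨h1', h2⟩
      · intro hp
        rcases Bool.or_eq_true _ _ |>.mp hp with hd | hm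
        · have hw : w ∈ pre := by simpa [List.contains_eq_mem] using hd
          have : 0 < pre.length := List.length_pos_of_mem hw
          refine ⟨by exact_mod_cast this, Or.inl ?_⟩
          have : 0 < pre.count w := List.count_pos_iff.mpr hw
          omega
        · rcases Bool.and_eq_true _ _ |>.mp hm with ⟨h1, h2⟩
          refine ⟨by exact_mod_cast of_decide_eq_true h1, Or.inr (of_decide_eq_true h2)⟩
    simp only [List.length_cons]
    rw [List.range'_succ, List.find?_cons]
    simp only [pvLoopA]
    split_ifs with hx
    · simp [hcond.mp hx]
    · have hb : pvP words pre.length = false := by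
        rw [← Bool.not_eq_true]; exact fun hp => hx (hcond.mpr hp)
      rw [hb]
      have h2 : words = (pre ++ [w]) ++ t := by simp [h]
      have hih := ih (pre ++ [w]) h2
      rw [List.foldl_append] at hih
      simp only [List.foldl_cons, List.foldl_nil] at hih
      have hlen : (pre ++ [w]).length = pre.length + 1 := by simp
      rw [hlen] at hih
      push_cast at hih
      simpa using hih

theorem pvFindDup_char (words : List String) : ∀ (rest pre : List String), words = pre ++ rest →
    pvFindDup (PySem.Set.ofList pre) (pre.length : Int) rest
    = ((List.range' pre.length rest.length).find? (pvDupB words)).map (fun k => (k : Int)) := by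
  intro rest
  induction rest with
  | nil => intro pre h; rfl
  | cons w t ih =>
    intro pre h
    have hget : (PySem.List.pyGet? words (pre.length : Int)).getD "" = w := by
      rw [h, PySem.List.pyGet?_append_length]; rfl
    have htake : words.take pre.length = pre := by rw [h]; exact List.take_left
    have hdup : pvDupB words pre.length = pre.contains w := by
      unfold pvDupB; rw [hget, htake]
    have hcont : PySem.Set.contains (PySem.Set.ofList pre) w = pre.contains w := by
      simp [PySem.Set.contains, PySem.Set.mem_ofList, List.contains_eq_mem]
    simp only [List.length_cons]
    rw [List.range'_succ, List.find?_cons]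
    by_cases hw : pre.contains w
    · have hw' : w ∈ pre := by simpa [List.contains_eq_mem] using hw
      simp [pvFindDup, hdup, hw, hw']
    · have hadd : (PySem.Set.ofList pre).add w = PySem.Set.ofList (pre ++ [w]) := by
        simp [PySem.Set.ofList_eq_foldl, List.foldl_append]
      have h2 : words = (pre ++ [w]) ++ t := by simp [h]
      have hlen : (pre ++ [w]).length = pre.length + 1 := by simp
      have hih := ih (pre ++ [w]) h2
      rw [hlen] at hih
      push_cast at hih
      simp only [pvFindDup, hcont, hw, Bool.false_eq_true, if_neg, not_false_iff, hdup]
      rw [hadd]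
      exact hih

theorem pvFindMism_range (words : List String) : ∀ (m a : Nat), 1 ≤ a →
    pvFindMism words (PySem.List.pyRange (a : Int) ((a + m : Nat) : Int) 1)
    = ((List.range' a m).find? (pvMismB words)).map (fun k => (k : Int)) := by
  intro m
  induction m with
  | zero =>
    intro a _
    rw [PySem.List.pyRange_one_eq_nil (by push_cast; omega)]
    rfl
  | succ m ih =>
    intro a ha
    rw [PySem.List.pyRange_one_cons (by push_cast; omega), List.range'_succ, List.find?_cons]
    by_cases hc : pvChar0 ((PySem.List.pyGet? words (a : Int)).getD "") ≠ pvCharL ((PySem.List.pyGet? words ((a : Int) - 1)).getD "")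
    · have hb : pvMismB words a = true := by
        unfold pvMismB
        rw [decide_eq_true ha, Bool.true_and, decide_eq_true hc]
      rw [hb]
      simp only [pvFindMism, if_pos hc, cond_true]
      rfl
    · have hb : pvMismB words a = false := by
        unfold pvMismB
        rw [decide_eq_true ha, Bool.true_and, decide_eq_false hc]
      rw [hb]
      simp only [pvFindMism, if_neg hc, cond_false]
      have h1 : (a : Int) + 1 = ((a + 1 : Nat) : Int) := by push_cast; ring
      have h2 : (a + (m + 1) : Nat) = ((a + 1) + m : Nat) := by omega
      rw [h1, h2]
      exact ih (a + 1) (by omega)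

theorem pvFindMism_char (words : List String) :
    pvFindMism words (PySem.List.pyRange 1 (words.length : Int) 1)
    = ((List.range' 1 (words.length - 1)).find? (pvMismB words)).map (fun k => (k : Int)) := by
  rcases hl : words.length with _ | m
  · rw [PySem.List.pyRange_one_eq_nil (by omega)]
    rfl
  · have h : ((m + 1 : Nat) : Int) = ((1 + m : Nat) : Int) := by push_cast; ring
    have h2 : m + 1 - 1 = m := by omega
    rw [h, h2]
    exact pvFindMism_range words m 1 (le_refl 1)

theorem pvFind_or_min (p q : Nat → Bool) (l : List Nat) (hl : l.Pairwise (· < ·)) :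
    pvCombine ((l.find? p).map (fun k => (k : Int))) ((l.find? q).map (fun k => (k : Int)))
    = (l.find? (fun x => p x || q x)).map (fun k => (k : Int)) := by
  induction l with
  | nil => rfl
  | cons x t ih =>
    have hx : ∀ y ∈ t, x < y := fun y hy => (List.pairwise_cons.mp hl).1 y hy
    have ht := ih (List.pairwise_cons.mp hl).2
    by_cases hp : p x
    · by_cases hq : q x
      · simp [List.find?_cons, hp, hq, pvCombine]
      · simp only [List.find?_cons, hp, hq, Bool.or_eq_true, cond_true, cond_false]
        cases h : t.find? q with
        | none => simp [pvCombine, hp]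
        | some y =>
          have : x < y := hx y (List.mem_of_find?_eq_some h)
          simp [pvCombine, hp, h]
          omega
    · by_cases hq : q x
      · simp only [List.find?_cons, hp, hq, Bool.or_eq_true, cond_true, cond_false]
        cases h : t.find? p with
        | none => simp [pvCombine, hq]
        | some y =>
          have : x < y := hx y (List.mem_of_find?_eq_some h)
          simp [pvCombine, hq, h]
          omega
      · simpa [List.find?_cons, hp, hq] using ht

theorem pvT_eq (words : List String) :
    pvLoopA words PySem.Dict.empty 0 words
    = (match PySem.List.min? ([pvFindDup PySem.Set.empty 0 words,
          pvFindMism words (PySem.List.pyRange 1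
            ((pvFindDup PySem.Set.empty 0 words).getD (words.length : Int)) 1)].filterMap id)
          (fun x => x) with
       | some m => m
       | none => (words.length : Int)) := by
  rcases words with _ | ⟨w, ws⟩
  · rfl
  · have hA := pvLoopA_char (w :: ws) (w :: ws) [] rfl
    have hD := pvFindDup_char (w :: ws) (w :: ws) [] rfl
    simp only [List.foldl_nil, List.length_nil, Nat.cast_zero, List.length_cons,
      Nat.add_sub_cancel] at hA hD
    have hrange : List.range' 0 (ws.length + 1) = 0 :: List.range' 1 ws.length := List.range'_succ
    have h0p : pvP (w :: ws) 0 = false := by simp [pvP, pvDupB, pvMismB]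
    have h0d : pvDupB (w :: ws) 0 = false := by simp [pvDupB]
    rw [hrange, List.find?_cons, h0p] at hA
    rw [hrange, List.find?_cons, h0d] at hD
    simp only [Bool.cond_false] at hA hD
    have hD' : pvFindDup PySem.Set.empty 0 (w :: ws)
        = ((List.range' 1 ws.length).find? (pvDupB (w :: ws))).map (fun k => (k : Int)) := hD
    have hpair : (List.range' 1 ws.length).Pairwise (· < ·) := by
      rw [List.range'_eq_map_range, List.pairwise_map]
      exact (List.pairwise_lt_range).imp (by omega)
    have hC := pvFind_or_min (pvDupB (w :: ws)) (pvMismB (w :: ws)) (List.range' 1 ws.length) hpair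
    have hPP : (fun x => pvDupB (w :: ws) x || pvMismB (w :: ws) x) = pvP (w :: ws) := rfl
    rw [hPP] at hC
    simp only [List.length_cons]
    rcases hd : (List.range' 1 ws.length).find? (pvDupB (w :: ws)) with _ | a
    · -- no duplicate: the mismatch scan runs to the end of the list
      have hD2 : pvFindDup PySem.Set.empty 0 (w :: ws) = none := by rw [hD', hd]; rfl
      have hM := pvFindMism_char (w :: ws)
      simp only [List.length_cons, Nat.add_sub_cancel] at hM
      rw [hd] at hC
      rw [hA, hD2, Option.getD_none, hM]
      rcases hp : (List.range' 1 ws.length).find? (pvP (w :: ws)) with _ | k <;>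
        rcases hm : (List.range' 1 ws.length).find? (pvMismB (w :: ws)) with _ | b <;>
        rw [hp, hm] at hC <;>
        simp_all [pvCombine, PySem.List.min?_id_cons, PySem.List.min?]
    · -- first duplicate at a: the mismatch scan is bounded by a
      have hD2 : pvFindDup PySem.Set.empty 0 (w :: ws) = some (a : Int) := by rw [hD', hd]; rfl
      have ha : 1 ≤ a ∧ a < 1 + ws.length :=
        List.mem_range'_1.mp (List.mem_of_find?_eq_some hd)
      have hMa : pvFindMism (w :: ws) (PySem.List.pyRange 1 (a : Int) 1)
          = ((List.range' 1 (a - 1)).find? (pvMismB (w :: ws))).map (fun k => (k : Int)) := by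
        have h1 := pvFindMism_range (w :: ws) (a - 1) 1 (le_refl 1)
        rw [show (1 + (a - 1) : Nat) = a by omega] at h1
        exact h1
      have hfull : (List.range' 1 ws.length).find? (pvMismB (w :: ws))
          = ((List.range' 1 (a - 1)).find? (pvMismB (w :: ws))).or
            ((List.range' a (ws.length - (a - 1))).find? (pvMismB (w :: ws))) := by
        have hsp := @List.range'_append_1 1 (a - 1) (ws.length - (a - 1))
        rw [show 1 + (a - 1) = a by omega, show (a - 1) + (ws.length - (a - 1)) = ws.length by omega] at hsp
        rw [← hsp, List.find?_append]
      rw [hd] at hC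
      rw [hA, hD2, Option.getD_some, hMa]
      rcases hm1 : (List.range' 1 (a - 1)).find? (pvMismB (w :: ws)) with _ | b
      · rcases hm2 : (List.range' a (ws.length - (a - 1))).find? (pvMismB (w :: ws)) with _ | c
        · rw [hfull, hm1, hm2] at hC
          rcases hp : (List.range' 1 ws.length).find? (pvP (w :: ws)) with _ | k <;>
            rw [hp] at hC <;>
            simp_all [pvCombine, PySem.List.min?_id_cons, PySem.List.min?]
        · have hcge : a ≤ c := by
            have := List.mem_range'_1.mp (List.mem_of_find?_eq_some hm2)
            omega
          rw [hfull, hm1, hm2] at hC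
          rcases hp : (List.range' 1 ws.length).find? (pvP (w :: ws)) with _ | k <;>
            rw [hp] at hC <;>
            simp_all [pvCombine, PySem.List.min?_id_cons, PySem.List.min?] <;>
            omega
      · have hble : b ≤ a - 1 := by
          have := List.mem_range'_1.mp (List.mem_of_find?_eq_some hm1)
          omega
        rw [hfull, hm1] at hC
        rcases hp : (List.range' 1 ws.length).find? (pvP (w :: ws)) with _ | k <;>
          rw [hp] at hC <;>
          simp_all [pvCombine, PySem.List.min?_id_cons, PySem.List.min?] <;>
          first
          | omega
          | (split_ifs <;> simp <;> omega)

-- ===== VERDICT (by name: the statement is the Claim_ definition above) =====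
theorem solution_spec : Claim_equal_solution := by
  unfold Claim_equal_solution
  intro n words _ _
  unfold Spec_solution solution solution_alt
  rw [pvT_eq]
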